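-- pv_equiv track=rewrite | github.com/Saikrishna0704/chatbot | group_proj.py | preprocess_messages
-- ===== SOURCE A (Python) =====
-- def preprocess_messages(messages):
--     processed_messages = []
--     for message in messages:
--         # Check if the message is from the user
--         if message["role"] == "user":
--             # Add emphasis on sea animals
--             processed_content = add_sea_animal_context(message["content"])
--             processed_messages.append({"role": message["role"], "content": processed_content})
--         else:
--             processed_messages.append(message)
--     return processed_messages
--
-- def add_sea_animal_context(content):
--     sea_animal_keywords = ["sea", "ocean", "marine", "aquatic", "underwater", "fish", "whale", "dolphin", "shark", "seal", "octopus", "coral", "seahorse", "turtle"]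
--     for keyword in sea_animal_keywords:
--         if keyword in content.lower():
--             # Add emphasis on sea animals if they are mentioned
--             return f"I'm interested in learning more about sea animals. {content}"
--     # If no sea animal keywords are found, return the original message
--     return content
-- ===== SOURCE B (Python) =====
-- _SEA_KEYWORDS = frozenset(["sea", "ocean", "marine", "aquatic", "underwater", "fish", "whale", "dolphin", "shark", "seal", "octopus", "coral", "seahorse", "turtle"])
-- _KW_LENS = sorted({len(k) for k in _SEA_KEYWORDS})  # [3, 4, 5, 6, 7, 8, 10]
-- _EMPHASIS = "I'm interested in learning more about sea animals. "
--
-- def _mentions_sea(content):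
--     # Multi-pattern matching by window hashing: collect every substring of the
--     # lowered content whose length is a keyword length into a hash set, then
--     # take one set intersection test against the keyword set (no per-keyword scan).
--     low = content.lower()
--     windows = {low[i:i + L] for i in range(len(low)) for L in _KW_LENS}
--     return not _SEA_KEYWORDS.isdisjoint(windows)
--
-- def preprocess_messages(messages):
--     return [
--         {"role": m["role"],
--          "content": _EMPHASIS + m["content"] if _mentions_sea(m["content"]) else m["content"]}
--         if m["role"] == "user" else m
--         for m in messages
--     ]
-- ===== Notes on version B (the rewrite author's own statement) =====
-- stated objective: alternative
-- what changed: The helper's per-keyword substring scan (one full search of the content per keyword, early return) is replaced by window hashing: all substrings of the lowered content with a keyword length are collected into a hash set once and membership is decided by a single set-intersection (isdisjoint) test against the keyword set, so no keyword is ever scanned against the text; the outer loop becomes a list comprehension.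
import Mathlib
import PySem

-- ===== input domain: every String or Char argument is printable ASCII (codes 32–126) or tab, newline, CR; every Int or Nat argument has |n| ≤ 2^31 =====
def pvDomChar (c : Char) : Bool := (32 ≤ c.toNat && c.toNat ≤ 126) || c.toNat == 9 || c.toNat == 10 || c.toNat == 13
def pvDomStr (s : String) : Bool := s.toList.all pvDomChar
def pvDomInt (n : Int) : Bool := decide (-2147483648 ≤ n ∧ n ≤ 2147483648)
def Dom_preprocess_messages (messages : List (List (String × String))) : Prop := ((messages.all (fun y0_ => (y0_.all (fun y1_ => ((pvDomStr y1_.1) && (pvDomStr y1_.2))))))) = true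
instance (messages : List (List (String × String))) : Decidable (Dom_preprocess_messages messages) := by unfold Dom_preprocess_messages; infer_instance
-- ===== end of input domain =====

-- B replaces the helper's per-keyword substring scan by window hashing (all keyword-length
-- substrings of the lowered content collected into a set, one isdisjoint test against the
-- keyword set) and the outer loop by a list comprehension; an alternative, not claimed faster.

def pvSeaKeywords : List String :=
  ["sea", "ocean", "marine", "aquatic", "underwater", "fish", "whale", "dolphin",
   "shark", "seal", "octopus", "coral", "seahorse", "turtle"]

-- ===== PORT A =====
-- 'for keyword in sea_animal_keywords: if keyword in content.lower(): return …'
def add_sea_animal_context_go (content : String) : List String → String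
  | [] => content
  | k :: ks =>
    if PySem.Str.isIn k (PySem.Str.lower content) then
      "I'm interested in learning more about sea animals. " ++ content
    else add_sea_animal_context_go content ks

def add_sea_animal_context (content : String) : String :=
  add_sea_animal_context_go content pvSeaKeywords

-- dict access message["key"] is first-match lookup in the association list; Pre_ guarantees the key
-- is present, so the getD default is never read on admitted inputs.
def preprocess_messages (messages : List (List (String × String))) : List (List (String × String)) :=
  messages.foldl
    (fun acc message =>
      if (message.lookup "role").getD "" = "user" then
        let processed := add_sea_animal_context ((message.lookup "content").getD "")
        acc ++ [[("role", (message.lookup "role").getD ""), ("content", processed)]]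
      else
        acc ++ [message])
    []

-- ===== PORT B =====
-- _KW_LENS = sorted({len(k) for k in _SEA_KEYWORDS}): a module-level constant, written out
def pvKwLens : List Nat := [3, 4, 5, 6, 7, 8, 10]

-- the set comprehension {low[i:i+L] for i in range(len(low)) for L in _KW_LENS}; the slice
-- low[i:i+L] with 0 ≤ i and 0 ≤ L is exactly (low.drop i).take L (PySem.List.slice_natCast_add)
def mentions_sea (content : String) : Bool :=
  let low := PySem.Chars.lower content.toList
  let windows : PySem.Set String := PySem.Set.ofList
    ((List.range low.length).flatMap fun i =>
      pvKwLens.map fun L => String.ofList ((low.drop i).take L))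
  !(PySem.Set.isdisjoint (PySem.Set.ofList pvSeaKeywords) windows)

def preprocess_messages_alt (messages : List (List (String × String))) : List (List (String × String)) :=
  messages.map fun m =>
    if (m.lookup "role").getD "" = "user" then
      let c := (m.lookup "content").getD ""
      [("role", (m.lookup "role").getD ""),
       ("content",
         if mentions_sea c then
           "I'm interested in learning more about sea animals. " ++ c
         else c)]
    else m

-- ===== PRECONDITION & SPEC =====
-- Pre_ excludes exactly the inputs on which Python A raises KeyError: a message without a "role"
-- key, or a message whose role is "user" without a "content" key (B raises there too).
def Pre_preprocess_messages (messages : List (List (String × String))) : Prop :=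
  (messages.all fun m =>
    (m.lookup "role").isSome &&
      (!((m.lookup "role").getD "" == "user") || (m.lookup "content").isSome)) = true
instance (messages : List (List (String × String))) : Decidable (Pre_preprocess_messages messages) := by
  unfold Pre_preprocess_messages; infer_instance

def pvWitness_preprocess_messages : (List (List (String × String))) :=
  [[("role", "user"), ("content", "I saw a Seal today")], [("role", "assistant"), ("content", "Nice!")]]

def Spec_preprocess_messages (messages : List (List (String × String))) (out : List (List (String × String))) : Prop := out = preprocess_messages_alt messages
instance (messages : List (List (String × String))) (out : List (List (String × String))) : Decidable (Spec_preprocess_messages messages out) := by unfold Spec_preprocess_messages; infer_instance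

-- ===== CLAIM (what is proved, stated in full; the proofs are below) =====
def Claim_equal_preprocess_messages : Prop := ∀ (messages : List (List (String × String))), Dom_preprocess_messages messages → Pre_preprocess_messages messages → Spec_preprocess_messages messages (preprocess_messages messages)

-- ===== LEMMAS AND PROOFS =====

lemma pvSeaKeywords_facts : ∀ k ∈ pvSeaKeywords, k.toList ≠ [] ∧ k.toList.length ∈ pvKwLens := by
  decide

-- a keyword is in the window set iff it is a substring of the lowered content
lemma mem_windows_iff (low : List Char) (k : String) (hk : k ∈ pvSeaKeywords) :
    (k ∈ PySem.Set.ofList ((List.range low.length).flatMap fun i =>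
        pvKwLens.map fun L => String.ofList ((low.drop i).take L)))
      ↔ PySem.Chars.isIn k.toList low = true := by
  rw [PySem.Set.mem_ofList]
  simp only [List.mem_flatMap, List.mem_map, List.mem_range]
  constructor
  · rintro ⟨i, _, L, _, hEq⟩
    apply (PySem.Chars.exists_prefix_drop_iff_isIn _ _).mp
    refine ⟨i, ?_⟩
    have : k.toList = (low.drop i).take L := by rw [← hEq]; simp
    rw [this]
    exact List.take_prefix _ _
  · intro hin
    obtain ⟨j, hpre⟩ := (PySem.Chars.exists_prefix_drop_iff_isIn _ _).mpr hin
    obtain ⟨hne, hlen⟩ := pvSeaKeywords_facts k hk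
    have hj : j < low.length := by
      by_contra hge
      rw [List.drop_eq_nil_of_le (by omega)] at hpre
      exact hne (List.prefix_nil.mp hpre)
    refine ⟨j, hj, k.toList.length, hlen, ?_⟩
    rw [← List.prefix_iff_eq_take.mp hpre, String.ofList_toList]

-- B's window-set test decides exactly "some keyword occurs in the lowered content"
lemma mentions_sea_eq (c : String) :
    mentions_sea c = pvSeaKeywords.any fun k => PySem.Str.isIn k (PySem.Str.lower c) := by
  have hlow : (PySem.Str.lower c).toList = PySem.Chars.lower c.toList := by simp [pysem]
  have hiff : (mentions_sea c = true) ↔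
      ((pvSeaKeywords.any fun k => PySem.Str.isIn k (PySem.Str.lower c)) = true) := by
    unfold mentions_sea
    rw [Bool.not_eq_eq_eq_not, Bool.not_true, ← Bool.not_eq_true,
      PySem.Set.isdisjoint_iff]
    push Not
    simp only [List.any_eq_true]
    constructor
    · rintro ⟨k, hk, hmem⟩
      have hk' : k ∈ pvSeaKeywords := (PySem.Set.mem_ofList _ _).mp hk
      refine ⟨k, hk', ?_⟩
      have := (mem_windows_iff _ k hk').mp hmem
      simp [pysem, hlow, this]
    · rintro ⟨k, hk, hin⟩
      refine ⟨k, (PySem.Set.mem_ofList _ _).mpr hk, ?_⟩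
      apply (mem_windows_iff _ k hk).mpr
      have : PySem.Chars.isIn k.toList (PySem.Str.lower c).toList = true := by
        simpa [pysem] using hin
      rwa [hlow] at this
  cases h : (pvSeaKeywords.any fun k => PySem.Str.isIn k (PySem.Str.lower c)) with
  | false => exact Bool.eq_false_iff.mpr fun ht => by rw [hiff.mp ht] at h; exact Bool.false_ne_true h.symm
  | true => exact hiff.mpr h

-- A's early-return keyword scan, characterised.
lemma go_eq_ite (content : String) (ks : List String) :
    add_sea_animal_context_go content ks =
      if ks.any (fun k => PySem.Str.isIn k (PySem.Str.lower content)) then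
        "I'm interested in learning more about sea animals. " ++ content
      else content := by
  induction ks with
  | nil => simp [add_sea_animal_context_go]
  | cons k ks ih =>
    rw [add_sea_animal_context_go, ih, List.any_cons]
    cases h : PySem.Str.isIn k (PySem.Str.lower content) <;> simp

lemma add_sea_animal_context_eq (c : String) :
    add_sea_animal_context c =
      if mentions_sea c then
        "I'm interested in learning more about sea animals. " ++ c
      else c := by
  rw [add_sea_animal_context, go_eq_ite, mentions_sea_eq]

lemma preprocess_messages_eq_map (messages : List (List (String × String))) :
    preprocess_messages messages =
      messages.map fun message =>
        if (message.lookup "role").getD "" = "user" then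
          [(("role" : String), (message.lookup "role").getD ""),
           (("content" : String), add_sea_animal_context ((message.lookup "content").getD ""))]
        else message := by
  rw [preprocess_messages]
  have : (fun (acc : List (List (String × String))) message =>
      if (message.lookup "role").getD "" = "user" then
        let processed := add_sea_animal_context ((message.lookup "content").getD "")
        acc ++ [[("role", (message.lookup "role").getD ""), ("content", processed)]]
      else acc ++ [message])
      = fun acc message => acc ++
        [if (message.lookup "role").getD "" = "user" then
          [(("role" : String), (message.lookup "role").getD ""),
           (("content" : String), add_sea_animal_context ((message.lookup "content").getD ""))]
         else message] := by
    funext acc message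
    by_cases h : (message.lookup "role").getD "" = "user" <;> simp [h]
  rw [this, PySem.List.foldl_append_singleton_eq_map]
  simp

-- ===== VERDICT (by name: the statement is the Claim_ definition above) =====
theorem preprocess_messages_spec : Claim_equal_preprocess_messages := by
  intro messages _ _
  unfold Spec_preprocess_messages preprocess_messages_alt
  rw [preprocess_messages_eq_map]
  apply List.map_congr_left
  intro m _
  by_cases h : (m.lookup "role").getD "" = "user" <;>
    simp [h, add_sea_animal_context_eq]
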